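-- pv_equiv track=rewrite | github.com/asweigart/programmedpatterns | book/visualpatterns.py | formula59
-- ===== SOURCE A (Python) =====
-- def formula59(step):
--     width = 4
--     height = 2
--     for i in range(2, step + 1):
--         if i % 2 == 0:
--             width += 2
--             height += 1
--         else:
--             width += 2
--             height += 2
--     return width * height
-- ===== SOURCE B (Python) =====
-- def formula59(step):
--     if step < 2:
--         return 8
--     return (2 * step + 2) * (2 * step - step // 2)
-- ===== Notes on version B (the rewrite author's own statement) =====
-- stated objective: faster
-- what changed: Replaced the O(step) parity loop by a closed-form product, counting the even and odd loop indices arithmetically (width = 2*step+2, height = 2*step - step//2), with a direct constant return when the range is empty.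
import Mathlib
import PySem

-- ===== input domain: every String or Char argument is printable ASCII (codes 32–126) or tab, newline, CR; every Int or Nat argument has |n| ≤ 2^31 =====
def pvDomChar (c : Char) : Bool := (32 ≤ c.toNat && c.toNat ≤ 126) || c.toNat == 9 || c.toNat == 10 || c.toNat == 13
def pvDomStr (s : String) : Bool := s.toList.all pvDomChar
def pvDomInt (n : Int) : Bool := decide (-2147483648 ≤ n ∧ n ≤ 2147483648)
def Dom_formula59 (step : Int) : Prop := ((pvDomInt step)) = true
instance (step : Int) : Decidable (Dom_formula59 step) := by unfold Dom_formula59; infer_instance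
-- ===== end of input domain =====

-- B replaces A's O(step) parity loop by an O(1) closed-form product (faster, asymptotic).

-- ===== PORT A =====
def formula59 (step : Int) : Int :=
  let st := (PySem.List.pyRange 2 (step + 1) 1).foldl
    (fun (wh : Int × Int) i =>
      if PySem.Int.mod i 2 = 0 then (wh.1 + 2, wh.2 + 1) else (wh.1 + 2, wh.2 + 2))
    (4, 2)
  st.1 * st.2

-- ===== PORT B =====
def formula59_alt (step : Int) : Int :=
  if step < 2 then 8
  else (2 * step + 2) * (2 * step - PySem.Int.floordiv step 2)

-- ===== PRECONDITION & SPEC =====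
def Spec_formula59 (step : Int) (out : Int) : Prop := out = formula59_alt step
instance (step : Int) (out : Int) : Decidable (Spec_formula59 step out) := by unfold Spec_formula59; infer_instance

-- ===== CLAIM (what is proved, stated in full; the proofs are below) =====
def Claim_equal_formula59 : Prop := ∀ (step : Int), Dom_formula59 step → Spec_formula59 step (formula59 step)

-- ===== LEMMAS AND PROOFS =====

-- the loop body, named for the lemmas
def pvStep59 (wh : Int × Int) (i : Int) : Int × Int :=
  if PySem.Int.mod i 2 = 0 then (wh.1 + 2, wh.2 + 1) else (wh.1 + 2, wh.2 + 2)

-- loop invariant: after processing range(2, b+1) the state is (2b+2, 2b - b//2), for b ≥ 1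
theorem pvLoop59 (b : Int) (hb : 1 ≤ b) :
    (PySem.List.pyRange 2 (b + 1) 1).foldl pvStep59 (4, 2)
      = (2 * b + 2, 2 * b - PySem.Int.floordiv b 2) := by
  induction b, hb using Int.le_induction with
  | base =>
    rw [PySem.List.pyRange_one_eq_nil (by omega)]
    decide
  | succ n hn ih =>
    rw [PySem.List.pyRange_one_succ_right (by omega : (2:Int) ≤ n + 1), List.foldl_append, ih]
    simp only [List.foldl_cons, List.foldl_nil, pvStep59]
    rw [PySem.Int.mod_eq_emod_of_pos (by omega : (0:Int) < 2),
        PySem.Int.floordiv_eq_ediv_of_pos (by omega : (0:Int) < 2),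
        PySem.Int.floordiv_eq_ediv_of_pos (by omega : (0:Int) < 2)]
    by_cases h : (n + 1) % 2 = 0
    · rw [if_pos h, Prod.mk.injEq]
      constructor <;> omega
    · rw [if_neg h, Prod.mk.injEq]
      constructor <;> omega

-- ===== VERDICT (by name: the statement is the Claim_ definition above) =====
theorem formula59_spec : Claim_equal_formula59 := by
  intro step _
  unfold Spec_formula59 formula59 formula59_alt
  by_cases h : step < 2
  · rw [PySem.List.pyRange_one_eq_nil (by omega)]
    simp [h]
  · push Not at h
    have := pvLoop59 step (by omega)
    simp only [if_neg (by omega : ¬ step < 2)]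
    show ((PySem.List.pyRange 2 (step + 1) 1).foldl pvStep59 (4, 2)).1 *
         ((PySem.List.pyRange 2 (step + 1) 1).foldl pvStep59 (4, 2)).2 = _
    rw [this]
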